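-- pv_equiv track=rewrite | github.com/AkankshaSingal8/situational_safety_for_embodied_agents | vlm_pipeline/build_cbf_ellipsoids.py | match_target_object
-- ===== SOURCE A (Python) =====
-- def match_target_object(end_object_desc, object_names):
--     """
--     Match high-level end_object description to actual object ID(s).
--
--     Uses token-based substring matching to map descriptions like "black bowl"
--     to structured object IDs like "akita_black_bowl_1".
--
--     Args:
--         end_object_desc: str - VLM description (e.g., "black bowl between the plate")
--         object_names: list[str] - available object IDs from metadata
--
--     Returns:
--         set[str] - matched object IDs to exclude from CBF constraints
--
--     Examples:
--         >>> match_target_object("black bowl", ["akita_black_bowl_1", "plate_1"])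
--         {'akita_black_bowl_1'}
--
--         >>> match_target_object("bowl", ["akita_black_bowl_1", "akita_black_bowl_2"])
--         {'akita_black_bowl_1', 'akita_black_bowl_2'}  # Conservative: exclude both
--     """
--     if not end_object_desc or not object_names:
--         return set()
--
--     # Common filler words to ignore
--     STOP_WORDS = {"the", "a", "an", "between", "and", "on", "in", "at", "to", "from", "near"}
--
--     # Extract descriptive tokens from VLM description
--     desc_tokens = set(
--         token.lower()
--         for token in end_object_desc.replace(",", " ").split()
--         if token.lower() not in STOP_WORDS and not token.isdigit()
--     )
--
--     if not desc_tokens: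
--         return set()
--
--     # Score each object by token overlap
--     scores = {}
--     for obj_name in object_names:
--         # Convert "akita_black_bowl_1" → ["akita", "black", "bowl", "1"]
--         obj_tokens = set(obj_name.lower().replace("_", " ").split())
--         # Count matching descriptive tokens (ignore numbers)
--         obj_tokens_no_digits = {t for t in obj_tokens if not t.isdigit()}
--         match_count = len(desc_tokens & obj_tokens_no_digits)
--         if match_count > 0:
--             scores[obj_name] = match_count
--
--     if not scores:
--         return set()
--
--     # Conservative approach: return ALL objects with highest match score
--     # This handles cases like "bowl" matching both "black_bowl_1" and "black_bowl_2"
--     max_score = max(scores.values())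
--     return {obj for obj, score in scores.items() if score == max_score}
-- ===== SOURCE B (Python) =====
-- def _score(desc_tokens, obj_name):
--     obj_tokens = set(obj_name.lower().replace("_", " ").split())
--     return len(desc_tokens & {t for t in obj_tokens if not t.isdigit()})
--
-- def match_target_object(end_object_desc, object_names):
--     if not end_object_desc or not object_names:
--         return set()
--     STOP_WORDS = {"the", "a", "an", "between", "and", "on", "in", "at", "to", "from", "near"}
--     desc_tokens = set(
--         token.lower()
--         for token in end_object_desc.replace(",", " ").split()
--         if token.lower() not in STOP_WORDS and not token.isdigit()
--     )
--     if not desc_tokens: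
--         return set()
--     # single streaming pass: keep the current best score and the set of objects attaining it
--     best_score = 0
--     best = set()
--     for obj_name in object_names:
--         mc = _score(desc_tokens, obj_name)
--         if mc > best_score:
--             best = {obj_name}
--             best_score = mc
--         elif mc == best_score and mc > 0:
--             best.add(obj_name)
--     return best
-- ===== Notes on version B (the rewrite author's own statement) =====
-- stated objective: alternative
-- what changed: Replaced A's build-a-scores-dict, then max over its values, then filter-by-max pipeline with a single streaming pass over object_names that maintains the running best score and the set of objects attaining it, resetting the set when a strictly better score appears.
import Mathlib
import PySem

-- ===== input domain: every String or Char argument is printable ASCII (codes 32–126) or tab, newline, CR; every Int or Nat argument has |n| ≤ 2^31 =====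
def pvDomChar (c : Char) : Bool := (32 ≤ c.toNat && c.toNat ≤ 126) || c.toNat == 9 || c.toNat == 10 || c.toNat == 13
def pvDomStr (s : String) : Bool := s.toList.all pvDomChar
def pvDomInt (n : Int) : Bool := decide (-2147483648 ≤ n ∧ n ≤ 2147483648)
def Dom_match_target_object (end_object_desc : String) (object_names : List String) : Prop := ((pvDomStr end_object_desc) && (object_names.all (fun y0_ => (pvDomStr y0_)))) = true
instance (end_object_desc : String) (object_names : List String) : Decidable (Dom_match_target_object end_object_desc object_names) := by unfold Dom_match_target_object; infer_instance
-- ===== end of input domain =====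

-- B replaces A's build-scores-dict / max / filter pipeline with a single streaming pass
-- keeping the current best score and the set of objects attaining it (objective: alternative).


-- ===== PORT A =====
-- desc_tokens extraction, shared shape of both Pythons
def pvDescTokens (end_object_desc : String) : PySem.Set String :=
  let STOP : PySem.Set String :=
    PySem.Set.ofList ["the", "a", "an", "between", "and", "on", "in", "at", "to", "from", "near"]
  PySem.Set.ofList
    (((PySem.Str.split₀ (PySem.Str.replace end_object_desc "," " ")).filter
        (fun t => !(STOP.contains (PySem.Str.lower t)) && !(PySem.Str.strIsdigit t))).map
      PySem.Str.lower)

def match_target_object (end_object_desc : String) (object_names : List String) : List String :=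
  if end_object_desc = "" ∨ object_names = [] then []
  else
    let desc_tokens := pvDescTokens end_object_desc
    if desc_tokens = [] then []
    else
      let scores : PySem.Dict String Int :=
        object_names.foldl
          (fun sc obj_name =>
            let obj_tokens : PySem.Set String :=
              PySem.Set.ofList (PySem.Str.split₀ (PySem.Str.replace (PySem.Str.lower obj_name) "_" " "))
            let obj_tokens_no_digits := obj_tokens.filter (fun t => !(PySem.Str.strIsdigit t))
            let match_count : Int := PySem.Set.len (PySem.Set.inter desc_tokens obj_tokens_no_digits)
            if 0 < match_count then sc.insert obj_name match_count else sc)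
          PySem.Dict.empty
      if scores.items = [] then []
      else
        match PySem.List.max? scores.values (fun v => v) with
        | none => []   -- unreachable: scores is nonempty here
        | some max_score =>
          PySem.Set.ofList
            ((scores.items.filter (fun p => decide (p.2 = max_score))).map Prod.fst)

-- ===== PORT B =====
def pvScore (desc_tokens : PySem.Set String) (obj_name : String) : Int :=
  let obj_tokens : PySem.Set String :=
    PySem.Set.ofList (PySem.Str.split₀ (PySem.Str.replace (PySem.Str.lower obj_name) "_" " "))
  PySem.Set.len (PySem.Set.inter desc_tokens (obj_tokens.filter (fun t => !(PySem.Str.strIsdigit t))))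

def match_target_object_alt (end_object_desc : String) (object_names : List String) : List String :=
  if end_object_desc = "" ∨ object_names = [] then []
  else
    let desc_tokens := pvDescTokens end_object_desc
    if desc_tokens = [] then []
    else
      (object_names.foldl
        (fun (st : PySem.Set String × Int) obj_name =>
          let mc := pvScore desc_tokens obj_name
          if st.2 < mc then ([obj_name], mc)
          else if mc = st.2 ∧ 0 < mc then (PySem.Set.add st.1 obj_name, st.2)
          else st)
        (PySem.Set.empty, 0)).1

-- ===== PRECONDITION & SPEC =====
def Spec_match_target_object (end_object_desc : String) (object_names : List String) (out : List String) : Prop := out = match_target_object_alt end_object_desc object_names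
instance (end_object_desc : String) (object_names : List String) (out : List String) : Decidable (Spec_match_target_object end_object_desc object_names out) := by unfold Spec_match_target_object; infer_instance

-- ===== CLAIM (what is proved, stated in full; the proofs are below) =====
def Claim_equal_match_target_object : Prop := ∀ (end_object_desc : String) (object_names : List String), Dom_match_target_object end_object_desc object_names → Spec_match_target_object end_object_desc object_names (match_target_object end_object_desc object_names)

-- ===== LEMMAS AND PROOFS =====

-- the loop invariant relating A's scores dict to B's (best_set, best_score) state
def pvInv (g : String → Int) (sc : PySem.Dict String Int) (st : PySem.Set String × Int) : Prop :=
  (∀ p ∈ sc.items, p.2 = g p.1 ∧ 0 < p.2 ∧ p.2 ≤ st.2) ∧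
  0 ≤ st.2 ∧
  (0 < st.2 → ∃ p ∈ sc.items, p.2 = st.2) ∧
  st.1 = (sc.items.filter (fun p => decide (p.2 = st.2))).map Prod.fst ∧
  sc.keys.Nodup

theorem pvSet_contains_iff (s : PySem.Set String) (x : String) : s.contains x = true ↔ x ∈ s := by
  simp [PySem.Set.contains]

theorem pvSet_add_of_mem (s : PySem.Set String) (x : String) (h : x ∈ s) :
    PySem.Set.add s x = s := by
  show (if s.contains x then s else s ++ [x]) = s
  rw [if_pos ((pvSet_contains_iff s x).mpr h)]

theorem pvSet_add_of_not_mem (s : PySem.Set String) (x : String) (h : x ∉ s) :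
    PySem.Set.add s x = s ++ [x] := by
  show (if s.contains x then s else s ++ [x]) = s ++ [x]
  rw [if_neg (by simpa using (fun hc => h ((pvSet_contains_iff s x).mp hc)))]

theorem pvOfList_nodup (l acc : List String) (hn : l.Nodup) (hd : ∀ x ∈ l, x ∉ acc) :
    l.foldl PySem.Set.add acc = acc ++ l := by
  induction l generalizing acc with
  | nil => simp
  | cons x t ih =>
    have hx : x ∉ acc := hd x (by simp)
    rw [List.foldl_cons, pvSet_add_of_not_mem acc x hx,
        ih (acc ++ [x]) hn.of_cons (by
          intro y hy
          simp only [List.mem_append, List.mem_singleton]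
          rintro (h1 | rfl)
          · exact hd y (by simp [hy]) h1
          · exact (List.nodup_cons.mp hn).1 hy)]
    simp

theorem pvSetOfList_nodup (l : List String) (hn : l.Nodup) : PySem.Set.ofList l = l := by
  have : PySem.Set.ofList l = l.foldl PySem.Set.add [] := rfl
  rw [this, pvOfList_nodup l [] hn (by simp)]
  simp

theorem pvDict_mem_fst (sc : PySem.Dict String Int) (k : String)
    (h : k ∈ sc.items.map Prod.fst) : ∃ v, (k, v) ∈ sc.items := by
  rcases List.mem_map.mp h with ⟨p, hp, he⟩
  exact ⟨p.2, by rwa [show (k, p.2) = p from by rw [← he]]⟩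

theorem pvStep_inv (g : String → Int) (sc : PySem.Dict String Int) (st : PySem.Set String × Int)
    (obj : String) (h : pvInv g sc st) :
    pvInv g (if 0 < g obj then sc.insert obj (g obj) else sc)
      (if st.2 < g obj then ([obj], g obj)
       else if g obj = st.2 ∧ 0 < g obj then (PySem.Set.add st.1 obj, st.2) else st) := by
  obtain ⟨h1, h2, h3, h4, h5⟩ := h
  have hkeys : sc.keys = sc.items.map Prod.fst := rfl
  by_cases hpos : 0 < g obj
  · rw [if_pos hpos]
    by_cases hc : sc.contains obj
    · -- key present: its stored value is g obj, so insert rewrites it to itself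
      have hmemk : obj ∈ sc.items.map Prod.fst := by
        rw [← hkeys]; exact (PySem.Dict.contains_iff_mem_keys sc obj).mp hc
      obtain ⟨v, hv⟩ := pvDict_mem_fst sc obj hmemk
      have hvval : v = g obj := (h1 (obj, v) hv).1
      have hitems : (sc.insert obj (g obj)).items = sc.items := by
        rw [PySem.Dict.items_insert, if_pos hc]
        have hid : ∀ p ∈ sc.items,
            (if (p.1 == obj) = true then (obj, g obj) else p) = id p := by
          intro p hp
          by_cases hpk : p.1 = obj
          · have hpe : p = (obj, g obj) :=
              Prod.ext_iff.mpr ⟨hpk, by rw [(h1 p hp).1, hpk]⟩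
            simp [hpe]
          · simp [hpk]
        rw [List.map_congr_left hid, List.map_id]
      have hle : g obj ≤ st.2 := by rw [← hvval]; exact (h1 (obj, v) hv).2.2
      have hnlt : ¬ st.2 < g obj := not_lt.mpr hle
      rw [if_neg hnlt]
      by_cases heq : g obj = st.2
      · rw [if_pos ⟨heq, hpos⟩]
        have hobj_mem : obj ∈ st.1 := by
          rw [h4]
          exact List.mem_map.mpr ⟨(obj, v), List.mem_filter.mpr ⟨hv, by simp [hvval, heq]⟩, rfl⟩
        exact ⟨by rw [hitems]; exact h1, h2, by rw [hitems]; exact h3,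
               by rw [hitems, pvSet_add_of_mem _ _ hobj_mem]; exact h4,
               PySem.Dict.nodup_keys_insert _ _ _ h5⟩
      · rw [if_neg (by tauto)]
        exact ⟨by rw [hitems]; exact h1, h2, by rw [hitems]; exact h3,
               by rw [hitems]; exact h4,
               PySem.Dict.nodup_keys_insert _ _ _ h5⟩
    · -- fresh key: appended
      have hc' : sc.contains obj = false := by simpa using hc
      have hitems : (sc.insert obj (g obj)).items = sc.items ++ [(obj, g obj)] := by
        rw [PySem.Dict.items_insert, if_neg (by simp [hc'])]
      have hnk : obj ∉ sc.items.map Prod.fst := by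
        intro hm
        exact hc ((PySem.Dict.contains_iff_mem_keys sc obj).mpr (by rwa [hkeys]))
      have hnodup' : (sc.insert obj (g obj)).keys.Nodup :=
        PySem.Dict.nodup_keys_insert _ _ _ h5
      by_cases hlt : st.2 < g obj
      · rw [if_pos hlt]
        refine ⟨?_, le_of_lt hpos, ?_, ?_, hnodup'⟩
        · intro p hp
          rw [hitems] at hp
          rcases List.mem_append.mp hp with hp | hp
          · exact ⟨(h1 p hp).1, (h1 p hp).2.1, le_of_lt (lt_of_le_of_lt (h1 p hp).2.2 hlt)⟩
          · simp only [List.mem_singleton] at hp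
            subst hp; exact ⟨rfl, hpos, le_refl _⟩
        · intro _
          exact ⟨(obj, g obj), by rw [hitems]; simp, rfl⟩
        · rw [hitems, List.filter_append, List.map_append]
          have : sc.items.filter (fun p => decide (p.2 = g obj)) = [] := by
            apply List.filter_eq_nil_iff.mpr
            intro p hp
            simp only [decide_eq_true_eq]
            exact ne_of_lt (lt_of_le_of_lt (h1 p hp).2.2 hlt)
          rw [this]; simp
      · rw [if_neg hlt]
        have hle : g obj ≤ st.2 := not_lt.mp hlt
        by_cases heq : g obj = st.2
        · rw [if_pos ⟨heq, hpos⟩]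
          have hobj_not : obj ∉ st.1 := by
            rw [h4]
            intro hm
            rcases List.mem_map.mp hm with ⟨p, hp, he⟩
            exact hnk (List.mem_map.mpr ⟨p, (List.mem_filter.mp hp).1, he⟩)
          refine ⟨?_, h2, ?_, ?_, hnodup'⟩
          · intro p hp
            rw [hitems] at hp
            rcases List.mem_append.mp hp with hp | hp
            · exact h1 p hp
            · simp only [List.mem_singleton] at hp
              subst hp; exact ⟨rfl, hpos, hle⟩
          · intro _
            exact ⟨(obj, g obj), by rw [hitems]; simp, heq⟩
          · rw [pvSet_add_of_not_mem _ _ hobj_not, hitems, List.filter_append,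
               List.map_append, h4]
            simp [heq]
        · rw [if_neg (by tauto)]
          refine ⟨?_, h2, ?_, ?_, hnodup'⟩
          · intro p hp
            rw [hitems] at hp
            rcases List.mem_append.mp hp with hp | hp
            · exact h1 p hp
            · simp only [List.mem_singleton] at hp
              subst hp; exact ⟨rfl, hpos, hle⟩
          · intro hb
            rcases h3 hb with ⟨p, hp, hpe⟩
            exact ⟨p, by rw [hitems]; exact List.mem_append.mpr (Or.inl hp), hpe⟩
          · rw [hitems, List.filter_append, List.map_append, h4]
            simp [heq]
  · rw [if_neg hpos]
    have hle : g obj ≤ 0 := not_lt.mp hpos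
    rw [if_neg (not_lt.mpr (le_trans hle h2)), if_neg (by rintro ⟨-, hp⟩; exact hpos hp)]
    exact ⟨h1, h2, h3, h4, h5⟩

theorem pvFold_inv (g : String → Int) (names : List String) (sc : PySem.Dict String Int)
    (st : PySem.Set String × Int) (h : pvInv g sc st) :
    pvInv g
      (names.foldl (fun sc obj => if 0 < g obj then sc.insert obj (g obj) else sc) sc)
      (names.foldl (fun st obj =>
        if st.2 < g obj then ([obj], g obj)
        else if g obj = st.2 ∧ 0 < g obj then (PySem.Set.add st.1 obj, st.2) else st) st) := by
  induction names generalizing sc st with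
  | nil => exact h
  | cons x t ih => exact ih _ _ (pvStep_inv g sc st x h)

theorem pvInv_init (g : String → Int) : pvInv g PySem.Dict.empty ([], 0) := by
  refine ⟨?_, le_refl _, ?_, ?_, ?_⟩ <;> simp [PySem.Dict.empty, PySem.Dict.keys]

theorem pvFinal (g : String → Int) (sc : PySem.Dict String Int) (st : PySem.Set String × Int)
    (h : pvInv g sc st) :
    (if sc.items = [] then []
     else
       match PySem.List.max? sc.values (fun v => v) with
       | none => []
       | some max_score =>
         PySem.Set.ofList ((sc.items.filter (fun p => decide (p.2 = max_score))).map Prod.fst))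
    = st.1 := by
  obtain ⟨h1, h2, h3, h4, h5⟩ := h
  by_cases hsc : sc.items = []
  · rw [if_pos hsc, h4, hsc]; simp
  · rw [if_neg hsc]
    have hvals : sc.values = sc.items.map (·.2) := rfl
    have hvne : sc.values ≠ [] := by
      rw [hvals]; simpa using hsc
    obtain ⟨p0, hp0⟩ := List.exists_mem_of_ne_nil _ hsc
    have hbpos : 0 < st.2 := lt_of_lt_of_le (h1 p0 hp0).2.1 (h1 p0 hp0).2.2
    obtain ⟨q, hq, hqe⟩ := h3 hbpos
    cases hmx : PySem.List.max? sc.values (fun v => v) with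
    | none => exact absurd ((PySem.List.max?_eq_none_iff _ _).mp hmx) hvne
    | some mx =>
      have hmx_mem : mx ∈ sc.values := PySem.List.max?_mem hmx
      have hmx_le : mx ≤ st.2 := by
        rw [hvals] at hmx_mem
        rcases List.mem_map.mp hmx_mem with ⟨p, hp, he⟩
        rw [← he]; exact (h1 p hp).2.2
      have hle_mx : st.2 ≤ mx := by
        have := PySem.List.max?_isMax hmx st.2 (by
          rw [hvals]; exact List.mem_map.mpr ⟨q, hq, hqe⟩)
        simpa using this
      have hmxb : mx = st.2 := le_antisymm hmx_le hle_mx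
      rw [hmxb]
      show PySem.Set.ofList ((sc.items.filter (fun p => decide (p.2 = st.2))).map Prod.fst) = st.1
      rw [← h4]
      apply pvSetOfList_nodup
      rw [h4]
      exact (List.Nodup.sublist (List.Sublist.map Prod.fst List.filter_sublist) h5)

-- ===== VERDICT (by name: the statement is the Claim_ definition above) =====
theorem match_target_object_spec : Claim_equal_match_target_object := by
  intro d ns _
  unfold Spec_match_target_object match_target_object match_target_object_alt
  by_cases h1 : d = "" ∨ ns = []
  · simp only [if_pos h1]
  · simp only [if_neg h1]
    by_cases h2 : pvDescTokens d = []
    · simp only [if_pos h2]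
    · simp only [if_neg h2]
      exact pvFinal (pvScore (pvDescTokens d)) _ _
        (pvFold_inv (pvScore (pvDescTokens d)) ns PySem.Dict.empty ([], 0)
          (pvInv_init _))
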